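-- pv_equiv track=rewrite | github.com/vipansegrouw/provisionerTokensTool | gui.py | price_formatter
-- ===== SOURCE A (Python) =====
-- def price_formatter(text):
--     text = str(text)
--     text = text[::-1]
--     string = "c"
--     for idx, character in enumerate(text):
--         if idx == 2:
--             string += "s"
--         if idx == 4:
--             string += "g"
--         string += character
--     return string[::-1]
-- ===== SOURCE B (Python) =====
-- def price_formatter(text):
--     s = str(text)
--     n = len(s)
--     if n >= 5:
--         return s[:n - 4] + "g" + s[n - 4:n - 2] + "s" + s[n - 2:] + "c"
--     if n >= 3:
--         return s[:n - 2] + "s" + s[n - 2:] + "c"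
--     return s + "c"
-- ===== Notes on version B (the rewrite author's own statement) =====
-- stated objective: faster
-- what changed: Replaces A's reverse-then-enumerate per-character loop (inserting separators at running indices 2 and 4 and reversing back) with a direct length-based case split assembling the result from three fixed slices plus separators; bulk slicing avoids per-character Python-level work and two full reversals.
import Mathlib
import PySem

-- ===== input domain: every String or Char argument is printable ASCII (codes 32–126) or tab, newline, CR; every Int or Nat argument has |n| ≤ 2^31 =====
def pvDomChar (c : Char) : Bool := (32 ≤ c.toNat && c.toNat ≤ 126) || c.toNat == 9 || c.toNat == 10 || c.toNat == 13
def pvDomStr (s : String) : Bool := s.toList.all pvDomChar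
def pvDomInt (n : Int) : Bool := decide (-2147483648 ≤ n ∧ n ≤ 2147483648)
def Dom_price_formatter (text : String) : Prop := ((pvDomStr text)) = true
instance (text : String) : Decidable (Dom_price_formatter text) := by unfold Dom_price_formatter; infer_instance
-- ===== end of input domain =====

-- B replaces A's reverse-and-indexed-loop with three fixed slice assemblies chosen by length (simpler, no reversal).

-- ===== PORT A =====
-- the 'for idx, character in enumerate(text)' loop with its accumulator 'string'
-- (enumerate ported as an explicit index counter; 'string += x' appends at the end)
def pfGo : Nat → List Char → List Char → List Char
  | _, [], acc => acc
  | idx, ch :: rest, acc =>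
    let acc := if idx = 2 then acc ++ ['s'] else acc
    let acc := if idx = 4 then acc ++ ['g'] else acc
    pfGo (idx + 1) rest (acc ++ [ch])

def price_formatter (text : String) : String :=
  -- str(text) is the identity on a str; text[::-1] reverses the characters (exact for any string)
  String.mk ((pfGo 0 text.toList.reverse ['c']).reverse)

-- ===== PORT B =====
def price_formatter_alt (text : String) : String :=
  let s := text.toList
  let n := s.length
  if 5 ≤ n then
    -- s[:n-4] + "g" + s[n-4:n-2] + "s" + s[n-2:] + "c"  (all bounds are in 0..n here, so slices = take/drop; exact)
    String.mk (s.take (n - 4) ++ ['g'] ++ (s.drop (n - 4)).take 2 ++ ['s'] ++ s.drop (n - 2) ++ ['c'])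
  else if 3 ≤ n then
    -- s[:n-2] + "s" + s[n-2:] + "c"
    String.mk (s.take (n - 2) ++ ['s'] ++ s.drop (n - 2) ++ ['c'])
  else
    String.mk (s ++ ['c'])

-- ===== PRECONDITION & SPEC =====
def Spec_price_formatter (text : String) (out : String) : Prop := out = price_formatter_alt text
instance (text : String) (out : String) : Decidable (Spec_price_formatter text out) := by unfold Spec_price_formatter; infer_instance

-- ===== CLAIM (what is proved, stated in full; the proofs are below) =====
def Claim_equal_price_formatter : Prop := ∀ (text : String), Dom_price_formatter text → Spec_price_formatter text (price_formatter text)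

-- ===== LEMMAS AND PROOFS =====

-- past index 4 the loop just appends the remaining characters
theorem pfGo_ge5 (cs : List Char) : ∀ (idx : Nat) (acc : List Char), 5 ≤ idx → pfGo idx cs acc = acc ++ cs := by
  induction cs with
  | nil => intro idx acc _; simp [pfGo]
  | cons c cs ih =>
      intro idx acc h
      have h2 : idx ≠ 2 := by omega
      have h4 : idx ≠ 4 := by omega
      simp [pfGo, h2, h4, ih (idx + 1) (acc ++ [c]) (by omega)]

theorem price_formatter_lists (l : List Char) :
    (pfGo 0 l.reverse ['c']).reverse =
      (if 5 ≤ l.length then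
        l.take (l.length - 4) ++ ['g'] ++ (l.drop (l.length - 4)).take 2 ++ ['s'] ++ l.drop (l.length - 2) ++ ['c']
      else if 3 ≤ l.length then
        l.take (l.length - 2) ++ ['s'] ++ l.drop (l.length - 2) ++ ['c']
      else l ++ ['c']) := by
  have key : ∀ r : List Char, (pfGo 0 r ['c']).reverse =
      (if 5 ≤ r.reverse.length then
        r.reverse.take (r.reverse.length - 4) ++ ['g'] ++ (r.reverse.drop (r.reverse.length - 4)).take 2 ++ ['s'] ++ r.reverse.drop (r.reverse.length - 2) ++ ['c']
      else if 3 ≤ r.reverse.length then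
        r.reverse.take (r.reverse.length - 2) ++ ['s'] ++ r.reverse.drop (r.reverse.length - 2) ++ ['c']
      else r.reverse ++ ['c']) := by
    intro r
    match r with
    | [] => simp [pfGo]
    | [x0] => simp [pfGo]
    | [x0, x1] => simp [pfGo]
    | [x0, x1, x2] => simp [pfGo]
    | [x0, x1, x2, x3] => simp [pfGo]
    | x0 :: x1 :: x2 :: x3 :: x4 :: ys =>
        have hgo : pfGo 0 (x0 :: x1 :: x2 :: x3 :: x4 :: ys) ['c']
            = ['c', x0, x1, 's', x2, x3, 'g', x4] ++ ys := by
          simp [pfGo, pfGo_ge5 ys 5 _ (by omega)]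
        have hlen : (x0 :: x1 :: x2 :: x3 :: x4 :: ys).reverse.length = ys.length + 5 := by simp
        have hrev : (x0 :: x1 :: x2 :: x3 :: x4 :: ys).reverse = ys.reverse ++ [x4, x3, x2, x1, x0] := by
          simp
        rw [hgo, hlen, hrev]
        have h5 : 5 ≤ ys.length + 5 := by omega
        rw [if_pos h5]
        have e1 : ys.length + 5 - 4 = (ys.reverse ++ [x4]).length := by simp
        have e2 : ys.length + 5 - 2 = (ys.reverse ++ [x4, x3, x2]).length := by simp
        have d1 : ys.reverse ++ [x4, x3, x2, x1, x0] = (ys.reverse ++ [x4]) ++ [x3, x2, x1, x0] := by simp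
        have d2 : ys.reverse ++ [x4, x3, x2, x1, x0] = (ys.reverse ++ [x4, x3, x2]) ++ [x1, x0] := by simp
        rw [e1]
        conv_lhs => rw [show (['c', x0, x1, 's', x2, x3, 'g', x4] ++ ys).reverse
          = ys.reverse ++ [x4, 'g', x3, x2, 's', x1, x0, 'c'] by simp]
        rw [show (ys.reverse ++ [x4, x3, x2, x1, x0]).take (ys.reverse ++ [x4]).length
          = ys.reverse ++ [x4] by rw [d1]; exact List.take_left]
        rw [show (ys.reverse ++ [x4, x3, x2, x1, x0]).drop (ys.reverse ++ [x4]).length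
          = [x3, x2, x1, x0] by rw [d1]; exact List.drop_left]
        rw [e2]
        rw [show (ys.reverse ++ [x4, x3, x2, x1, x0]).drop (ys.reverse ++ [x4, x3, x2]).length
          = [x1, x0] by rw [d2]; exact List.drop_left]
        simp
  have := key l.reverse
  simpa using this

-- ===== VERDICT (by name: the statement is the Claim_ definition above) =====
theorem price_formatter_spec : Claim_equal_price_formatter := by
  intro text _
  unfold Spec_price_formatter price_formatter price_formatter_alt
  simp only []
  rw [price_formatter_lists text.toList]
  split_ifs <;> rfl
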